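-- pv_equiv track=rewrite | github.com/pc5401/my_BOJ | 백준/Silver/12717. Crop Triangles （Small）/Crop Triangles （Small）.py | solve
-- ===== SOURCE A (Python) =====
-- def solve(n: int, A: int, B: int, C: int, D: int, x: int, y: int, M: int) -> int:
--     cnts = [0] * 9
--     X, Y = x, y
--     cnts_idx = (X % 3) * 3 + (Y % 3)
--     cnts[cnts_idx] += 1
--
--
--     for _ in range(1, n):
--         X = (A * X + B) % M
--         Y = (C * Y + D) % M
--         cnts_idx = (X % 3) * 3 + (Y % 3)
--         cnts[cnts_idx] += 1
--
--     mod_x = [i // 3 for i in range(9)]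
--     mod_y = [i % 3 for i in range(9)]
--
--     total = 0
--
--     for i in range(9):
--         for j in range(i, 9):
--             for k in range(j, 9):
--                 sum_x = mod_x[i] + mod_x[j] + mod_x[k]
--                 sum_y = mod_y[i] + mod_y[j] + mod_y[k]
--                 if sum_x % 3 == 0 and sum_y % 3 == 0:
--                     c_i, c_j, c_k = cnts[i], cnts[j], cnts[k]
--                     if i == j == k:
--                         total += c_i * (c_i - 1) * (c_i - 2) // 6
--                     elif i == j:
--                         total += c_i * (c_i - 1) // 2 * c_k
--                     elif j == k:
--                         total += c_j * (c_j - 1) // 2 * c_i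
--                     else:
--                         total += c_i * c_j * c_k
--     return total
-- ===== SOURCE B (Python) =====
-- def solve(n: int, A: int, B: int, C: int, D: int, x: int, y: int, M: int) -> int:
--     # Inclusion-exclusion over ordered triples instead of the 9-bucket case-split loop.
--     cnt = [0] * 9
--     X, Y = x, y
--     cnt[(X % 3) * 3 + (Y % 3)] += 1
--     for _ in range(1, n):
--         X = (A * X + B) % M
--         Y = (C * Y + D) % M
--         cnt[(X % 3) * 3 + (Y % 3)] += 1
--     # T = ordered triples (with repetition) of points whose residue sums are 0 mod 3
--     T = 0
--     for u in range(9):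
--         for v in range(9):
--             w = ((-(u // 3 + v // 3)) % 3) * 3 + ((-(u % 3 + v % 3)) % 3)
--             T += cnt[u] * cnt[v] * cnt[w]
--     sq = sum(c * c for c in cnt)
--     m = sum(cnt)
--     # remove triples using a point twice (3*(sq - m)) or thrice (m); /6 orders
--     return (T - 3 * (sq - m) - m) // 6
-- ===== Notes on version B (the rewrite author's own statement) =====
-- stated objective: simpler
-- what changed: B keeps A's point-generation recurrence but replaces the 165-case bucket-triple loop with its combinatorial case split by an inclusion-exclusion closed form: count ordered residue triples summing to 0 mod 3, subtract triples reusing a point, divide by 6.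
import Mathlib
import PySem

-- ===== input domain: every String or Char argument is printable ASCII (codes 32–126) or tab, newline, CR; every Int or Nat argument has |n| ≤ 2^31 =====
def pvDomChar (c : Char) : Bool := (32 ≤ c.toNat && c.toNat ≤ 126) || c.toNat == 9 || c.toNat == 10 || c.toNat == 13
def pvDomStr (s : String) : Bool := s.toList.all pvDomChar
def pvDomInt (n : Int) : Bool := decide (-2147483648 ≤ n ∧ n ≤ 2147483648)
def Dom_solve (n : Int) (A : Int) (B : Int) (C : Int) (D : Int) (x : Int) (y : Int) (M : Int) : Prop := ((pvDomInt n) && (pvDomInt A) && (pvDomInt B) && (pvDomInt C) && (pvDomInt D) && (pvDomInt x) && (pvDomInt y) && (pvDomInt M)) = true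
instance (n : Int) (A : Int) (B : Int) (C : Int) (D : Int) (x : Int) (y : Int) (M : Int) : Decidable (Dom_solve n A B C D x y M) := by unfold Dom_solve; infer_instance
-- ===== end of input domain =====

-- B replaces A's 165-case bucket-triple loop by an inclusion–exclusion closed form over
-- ordered point triples (objective: simpler; same point-generation recurrence).

-- ===== PORT A =====
-- the point-generation recurrence (these lines are identical in A and in B; shared helper)
def pvGen (n A B C D x y M : Int) : Int × Int × List Int :=
  let cnts : List Int := List.replicate 9 0
  let idx0 : Int := PySem.Int.mod x 3 * 3 + PySem.Int.mod y 3
  let cnts := PySem.List.pySetD cnts idx0 (PySem.List.pyGetD cnts idx0 0 + 1)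
  (PySem.List.pyRange 1 n 1).foldl (fun (s : Int × Int × List Int) _ =>
      let X := PySem.Int.mod (A * s.1 + B) M
      let Y := PySem.Int.mod (C * s.2.1 + D) M
      let ci := PySem.Int.mod X 3 * 3 + PySem.Int.mod Y 3
      (X, Y, PySem.List.pySetD s.2.2 ci (PySem.List.pyGetD s.2.2 ci 0 + 1))) (x, y, cnts)

-- A's triple loop over the 9 buckets with the combinatorial case split
def pvCountA (cnts : List Int) : Int :=
  let mod_x := (PySem.List.pyRange 0 9 1).map (fun i => PySem.Int.floordiv i 3)
  let mod_y := (PySem.List.pyRange 0 9 1).map (fun i => PySem.Int.mod i 3)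
  (PySem.List.pyRange 0 9 1).foldl (fun total i =>
    (PySem.List.pyRange i 9 1).foldl (fun total j =>
      (PySem.List.pyRange j 9 1).foldl (fun total k =>
        let sum_x := PySem.List.pyGetD mod_x i 0 + PySem.List.pyGetD mod_x j 0 + PySem.List.pyGetD mod_x k 0
        let sum_y := PySem.List.pyGetD mod_y i 0 + PySem.List.pyGetD mod_y j 0 + PySem.List.pyGetD mod_y k 0
        if PySem.Int.mod sum_x 3 = 0 ∧ PySem.Int.mod sum_y 3 = 0 then
          let c_i := PySem.List.pyGetD cnts i 0
          let c_j := PySem.List.pyGetD cnts j 0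
          let c_k := PySem.List.pyGetD cnts k 0
          if i = j ∧ j = k then total + PySem.Int.floordiv (c_i * (c_i - 1) * (c_i - 2)) 6
          else if i = j then total + PySem.Int.floordiv (c_i * (c_i - 1)) 2 * c_k
          else if j = k then total + PySem.Int.floordiv (c_j * (c_j - 1)) 2 * c_i
          else total + c_i * c_j * c_k
        else total) total) total) 0

def solve (n : Int) (A : Int) (B : Int) (C : Int) (D : Int) (x : Int) (y : Int) (M : Int) : Int :=
  pvCountA (pvGen n A B C D x y M).2.2

-- ===== PORT B =====
-- B's inclusion–exclusion count: ordered triples with repetition, minus repeats, over 6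
def pvCountB (cnt : List Int) : Int :=
  let T := (PySem.List.pyRange 0 9 1).foldl (fun T u =>
    (PySem.List.pyRange 0 9 1).foldl (fun T v =>
      let w := PySem.Int.mod (-(PySem.Int.floordiv u 3 + PySem.Int.floordiv v 3)) 3 * 3 +
               PySem.Int.mod (-(PySem.Int.mod u 3 + PySem.Int.mod v 3)) 3
      T + PySem.List.pyGetD cnt u 0 * PySem.List.pyGetD cnt v 0 * PySem.List.pyGetD cnt w 0) T) 0
  let sq := (cnt.map (fun c => c * c)).sum
  let m := cnt.sum
  PySem.Int.floordiv (T - 3 * (sq - m) - m) 6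

def solve_alt (n : Int) (A : Int) (B : Int) (C : Int) (D : Int) (x : Int) (y : Int) (M : Int) : Int :=
  pvCountB (pvGen n A B C D x y M).2.2

-- ===== PRECONDITION & SPEC =====
-- Pre_ excludes exactly the inputs where Python A raises ZeroDivisionError: M = 0 with n ≥ 2
def Pre_solve (n : Int) (A : Int) (B : Int) (C : Int) (D : Int) (x : Int) (y : Int) (M : Int) : Prop := n ≤ 1 ∨ M ≠ 0
instance (n : Int) (A : Int) (B : Int) (C : Int) (D : Int) (x : Int) (y : Int) (M : Int) : Decidable (Pre_solve n A B C D x y M) := by unfold Pre_solve; infer_instance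
def pvWitness_solve : Int × Int × Int × Int × Int × Int × Int × Int := (3, 1, 1, 1, 1, 0, 0, 7)

def Spec_solve (n : Int) (A : Int) (B : Int) (C : Int) (D : Int) (x : Int) (y : Int) (M : Int) (out : Int) : Prop := out = solve_alt n A B C D x y M
instance (n : Int) (A : Int) (B : Int) (C : Int) (D : Int) (x : Int) (y : Int) (M : Int) (out : Int) : Decidable (Spec_solve n A B C D x y M out) := by unfold Spec_solve; infer_instance

-- ===== CLAIM (what is proved, stated in full; the proofs are below) =====
def Claim_equal_solve : Prop := ∀ (n : Int) (A : Int) (B : Int) (C : Int) (D : Int) (x : Int) (y : Int) (M : Int), Dom_solve n A B C D x y M → Pre_solve n A B C D x y M → Spec_solve n A B C D x y M (solve n A B C D x y M)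

-- ===== LEMMAS AND PROOFS =====

lemma pv_two_dvd (c : Int) : (2:Int) ∣ c * (c - 1) := by
  have h : c % 2 = 0 ∨ c % 2 = 1 := by omega
  rcases h with h | h
  · exact Dvd.dvd.mul_right (by omega) _
  · exact Dvd.dvd.mul_left (by omega) _

lemma pv_six_dvd (c : Int) : (6:Int) ∣ c * (c - 1) * (c - 2) := by
  obtain ⟨a, ha⟩ : (2:Int) ∣ c * (c - 1) * (c - 2) := (pv_two_dvd c).mul_right _
  have h3 : (3:Int) ∣ c ∨ (3:Int) ∣ (c - 1) ∨ (3:Int) ∣ (c - 2) := by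
    have h : c % 3 = 0 ∨ c % 3 = 1 ∨ c % 3 = 2 := by omega
    rcases h with h | h | h
    · exact Or.inl (by omega)
    · exact Or.inr (Or.inl (by omega))
    · exact Or.inr (Or.inr (by omega))
  obtain ⟨b, hb⟩ : (3:Int) ∣ c * (c - 1) * (c - 2) := by
    rcases h3 with h | h | h
    · exact (h.mul_right _).mul_right _
    · exact (Dvd.dvd.mul_left h _).mul_right _
    · exact Dvd.dvd.mul_left h _
  refine ⟨a - b, ?_⟩
  generalize c * (c - 1) * (c - 2) = P at ha hb ⊢
  omega

lemma pv_fd6 (q : Int) : PySem.Int.floordiv (6 * q) 6 = q := by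
  rw [PySem.Int.floordiv_eq_ediv_of_pos (by norm_num)]
  exact Int.mul_ediv_cancel_left q (by norm_num)

lemma pv_eq_fd6 (s e : Int) (h : e = 6 * s) : s = PySem.Int.floordiv e 6 := by rw [h, pv_fd6]

-- the heart: A's case-split bucket count equals B's closed form, for any 9 counters
set_option maxRecDepth 100000 in
set_option maxHeartbeats 1000000 in
lemma pv_count_eq (c0 c1 c2 c3 c4 c5 c6 c7 c8 : Int) :
    pvCountA [c0, c1, c2, c3, c4, c5, c6, c7, c8] = pvCountB [c0, c1, c2, c3, c4, c5, c6, c7, c8] := by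
  have ha : pvCountA [c0, c1, c2, c3, c4, c5, c6, c7, c8] = (((((((((((((((((((((0 + PySem.Int.floordiv (c0 * (c0 - 1) * (c0 - 2)) 6) + c0 * c1 * c2) + c0 * c3 * c6) + c0 * c4 * c8) + c0 * c5 * c7) + PySem.Int.floordiv (c1 * (c1 - 1) * (c1 - 2)) 6) + c1 * c3 * c8) + c1 * c4 * c7) + c1 * c5 * c6) + PySem.Int.floordiv (c2 * (c2 - 1) * (c2 - 2)) 6) + c2 * c3 * c7) + c2 * c4 * c6) + c2 * c5 * c8) + PySem.Int.floordiv (c3 * (c3 - 1) * (c3 - 2)) 6) + c3 * c4 * c5) + PySem.Int.floordiv (c4 * (c4 - 1) * (c4 - 2)) 6) + PySem.Int.floordiv (c5 * (c5 - 1) * (c5 - 2)) 6) + PySem.Int.floordiv (c6 * (c6 - 1) * (c6 - 2)) 6) + c6 * c7 * c8) + PySem.Int.floordiv (c7 * (c7 - 1) * (c7 - 2)) 6) + PySem.Int.floordiv (c8 * (c8 - 1) * (c8 - 2)) 6) := rfl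
  have hb : pvCountB [c0, c1, c2, c3, c4, c5, c6, c7, c8] = PySem.Int.floordiv ((((((((((((((((((((((((((((((((((((((((((((((((((((((((((((((((((((((((((((((((((0 + c0 * c0 * c0) + c0 * c1 * c2) + c0 * c2 * c1) + c0 * c3 * c6) + c0 * c4 * c8) + c0 * c5 * c7) + c0 * c6 * c3) + c0 * c7 * c5) + c0 * c8 * c4) + c1 * c0 * c2) + c1 * c1 * c1) + c1 * c2 * c0) + c1 * c3 * c8) + c1 * c4 * c7) + c1 * c5 * c6) + c1 * c6 * c5) + c1 * c7 * c4) + c1 * c8 * c3) + c2 * c0 * c1) + c2 * c1 * c0) + c2 * c2 * c2) + c2 * c3 * c7) + c2 * c4 * c6) + c2 * c5 * c8) + c2 * c6 * c4) + c2 * c7 * c3) + c2 * c8 * c5) + c3 * c0 * c6) + c3 * c1 * c8) + c3 * c2 * c7) + c3 * c3 * c3) + c3 * c4 * c5) + c3 * c5 * c4) + c3 * c6 * c0) + c3 * c7 * c2) + c3 * c8 * c1) + c4 * c0 * c8) + c4 * c1 * c7) + c4 * c2 * c6) + c4 * c3 * c5) + c4 * c4 * c4) + c4 * c5 * c3) +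 c4 * c6 * c2) + c4 * c7 * c1) + c4 * c8 * c0) + c5 * c0 * c7) + c5 * c1 * c6) + c5 * c2 * c8) + c5 * c3 * c4) + c5 * c4 * c3) + c5 * c5 * c5) + c5 * c6 * c1) + c5 * c7 * c0) + c5 * c8 * c2) + c6 * c0 * c3) + c6 * c1 * c5) + c6 * c2 * c4) + c6 * c3 * c0) + c6 * c4 * c2) + c6 * c5 * c1) + c6 * c6 * c6) + c6 * c7 * c8) + c6 * c8 * c7) + c7 * c0 * c5) + c7 * c1 * c4) + c7 * c2 * c3) + c7 * c3 * c2) + c7 * c4 * c1) + c7 * c5 * c0) + c7 * c6 * c8) + c7 * c7 * c7) + c7 * c8 * c6) + c8 * c0 * c4) + c8 * c1 * c3) + c8 * c2 * c5) + c8 * c3 * c1) + c8 * c4 * c0) + c8 * c5 * c2) + c8 * c6 * c7) + c8 * c7 * c6) + c8 * c8 * c8) - 3 * ((c0 * c0 + (c1 * c1 + (c2 * c2 + (c3 * c3 + (c4 * c4 + (c5 * c5 + (c6 * c6 + (c7 * c7 + (c8 * c8 + 0))))))))) - (c0 + (c1 + (c2 + (c3 + (c4 + (c5 + (c6 + (c7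 + (c8 + 0)))))))))) - (c0 + (c1 + (c2 + (c3 + (c4 + (c5 + (c6 + (c7 + (c8 + 0)))))))))) 6 := rfl
  rw [ha, hb]
  obtain ⟨q0, hq0⟩ := pv_six_dvd c0
  obtain ⟨q1, hq1⟩ := pv_six_dvd c1
  obtain ⟨q2, hq2⟩ := pv_six_dvd c2
  obtain ⟨q3, hq3⟩ := pv_six_dvd c3
  obtain ⟨q4, hq4⟩ := pv_six_dvd c4
  obtain ⟨q5, hq5⟩ := pv_six_dvd c5
  obtain ⟨q6, hq6⟩ := pv_six_dvd c6
  obtain ⟨q7, hq7⟩ := pv_six_dvd c7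
  obtain ⟨q8, hq8⟩ := pv_six_dvd c8
  rw [hq0, hq1, hq2, hq3, hq4, hq5, hq6, hq7, hq8]
  simp only [pv_fd6]
  apply pv_eq_fd6
  linear_combination hq0 + hq1 + hq2 + hq3 + hq4 + hq5 + hq6 + hq7 + hq8

lemma pv_gen_len (n A B C D x y M : Int) : (pvGen n A B C D x y M).2.2.length = 9 := by
  unfold pvGen
  have key : ∀ (l : List Int) (s : Int × Int × List Int), s.2.2.length = 9 →
      ((l.foldl (fun (s : Int × Int × List Int) _ =>
        let X := PySem.Int.mod (A * s.1 + B) M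
        let Y := PySem.Int.mod (C * s.2.1 + D) M
        let ci := PySem.Int.mod X 3 * 3 + PySem.Int.mod Y 3
        (X, Y, PySem.List.pySetD s.2.2 ci (PySem.List.pyGetD s.2.2 ci 0 + 1))) s).2.2.length = 9) := by
    intro l
    induction l with
    | nil => intro s hs; simpa using hs
    | cons a t ih =>
        intro s hs
        simp only [List.foldl_cons]
        exact ih _ (by simpa [PySem.List.length_pySetD] using hs)
  exact key _ _ (by simp [PySem.List.length_pySetD])

lemma pv_len9 (l : List Int) (h : l.length = 9) :
    ∃ a b c d e f g i j, l = [a, b, c, d, e, f, g, i, j] := by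
  rcases l with _ | ⟨a, l⟩; · simp at h
  rcases l with _ | ⟨b, l⟩; · simp at h
  rcases l with _ | ⟨c, l⟩; · simp at h
  rcases l with _ | ⟨d, l⟩; · simp at h
  rcases l with _ | ⟨e, l⟩; · simp at h
  rcases l with _ | ⟨f, l⟩; · simp at h
  rcases l with _ | ⟨g, l⟩; · simp at h
  rcases l with _ | ⟨i, l⟩; · simp at h
  rcases l with _ | ⟨j, l⟩; · simp at h
  rcases l with _ | ⟨k, l⟩; · exact ⟨a, b, c, d, e, f, g, i, j, rfl⟩
  simp at h

theorem solve_spec : Claim_equal_solve := by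
  intro n A B C D x y M _ _
  unfold Spec_solve solve solve_alt
  obtain ⟨a, b, c, d, e, f, g, i, j, hl⟩ := pv_len9 _ (pv_gen_len n A B C D x y M)
  rw [hl]
  exact pv_count_eq a b c d e f g i j
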